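-- pv_equiv track=rewrite | github.com/dfloer/OpenCity2k | sc2_parse.py | misc_uninterleave_data
-- ===== SOURCE A (Python) =====
-- def misc_uninterleave_data(keys, offset, length, misc_data):
--     """
--     Args:
--         keys (): list of keys? representing the data we want to parse.
--         offset (int): Offset into MISC where the segment we want to uninterleave starts.
--         length (int): Total length of the section.
--         misc_data: Data from the MISC section that needs to be uninterlaved
--     Returns:
--         A dictionary with the key being .
--     """
--     num_keys = len(keys)
--     values = [[] for x in range(num_keys)]
--     for idx, val in enumerate(range(offset, offset + length, 4)):
--         values[idx % num_keys].extend(misc_data)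
--     output = {}
--     for idx, key_name in enumerate(keys):
--         output[key_name] = values[idx]
--     return output
-- ===== SOURCE B (Python) =====
-- def misc_uninterleave_data(keys, offset, length, misc_data):
--     """Closed-form re-implementation: instead of simulating every interleave
--     step, compute how many times each key's slot gets extended and build each
--     value by list multiplication."""
--     n = len(range(offset, offset + length, 4))
--     if not keys:
--         return {}
--     q, r = divmod(n, len(keys))
--     base = list(misc_data)
--     return {key: base * (q + (1 if i < r else 0))
--             for i, key in enumerate(keys)}
-- ===== Notes on version B (the rewrite author's own statement) =====
-- stated objective: simpler
-- what changed: Replaces the step-by-step simulation of the interleave loop (one extend per element of range(offset, offset+length, 4)) with a closed form: the number of steps n is read off the range, each key's repetition count is n//num_keys plus one for the first n%num_keys keys, and the dict is built directly by comprehension with list multiplication. (Pre_ excludes only keys=[] with length>0, where A raises ZeroDivisionError.)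
import Mathlib
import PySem

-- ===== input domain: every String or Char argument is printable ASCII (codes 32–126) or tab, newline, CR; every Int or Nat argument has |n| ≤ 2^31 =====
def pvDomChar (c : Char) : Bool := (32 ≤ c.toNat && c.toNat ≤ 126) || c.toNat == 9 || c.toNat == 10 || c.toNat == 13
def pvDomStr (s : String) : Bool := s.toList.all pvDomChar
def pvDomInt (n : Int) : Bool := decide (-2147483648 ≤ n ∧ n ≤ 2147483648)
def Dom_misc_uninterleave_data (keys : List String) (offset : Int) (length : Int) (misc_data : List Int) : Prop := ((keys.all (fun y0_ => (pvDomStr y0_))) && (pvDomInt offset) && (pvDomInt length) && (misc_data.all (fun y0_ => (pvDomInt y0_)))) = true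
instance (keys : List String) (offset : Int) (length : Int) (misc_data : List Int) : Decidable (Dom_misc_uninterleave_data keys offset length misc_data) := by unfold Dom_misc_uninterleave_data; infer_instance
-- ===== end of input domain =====

-- ===== PORT A =====
-- Port of A. B changes only the algorithm (closed-form counts instead of step simulation);
-- equivalence is about the return value. (A mutates nothing observable.)
def misc_uninterleave_data (keys : List String) (offset : Int) (length : Int) (misc_data : List Int) : List (String × List Int) :=
  let num_keys : Int := (keys.length : Int)
  let values : List (List Int) := (PySem.List.pyRange 0 num_keys 1).map (fun _ => ([] : List Int))
  let values :=
    (PySem.List.enumerate (PySem.List.pyRange offset (offset + length) 4)).foldl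
      (fun vs p => vs.modify (PySem.Int.mod p.1 num_keys).toNat (· ++ misc_data)) values
  ((PySem.List.enumerate keys).foldl
      (fun (d : PySem.Dict String (List Int)) p =>
        d.insert p.2 (PySem.List.pyGetD values p.1 [])) PySem.Dict.empty).items

-- ===== PORT B =====
def misc_uninterleave_data_alt (keys : List String) (offset : Int) (length : Int) (misc_data : List Int) : List (String × List Int) :=
  let n : Int := ((PySem.List.pyRange offset (offset + length) 4).length : Int)
  if keys.isEmpty then []
  else
    let q := PySem.Int.floordiv n (keys.length : Int)
    let r := PySem.Int.mod n (keys.length : Int)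
    ((PySem.List.enumerate keys).foldl
        (fun (d : PySem.Dict String (List Int)) p =>
          d.insert p.2 (PySem.List.pyRepeat misc_data (q + (if p.1 < r then 1 else 0))))
        PySem.Dict.empty).items

-- ===== PRECONDITION & SPEC =====
-- Pre_ excludes only the inputs where A raises ZeroDivisionError (keys empty while the
-- interleave range is nonempty, i.e. length > 0); A returns normally everywhere else.
def Pre_misc_uninterleave_data (keys : List String) (offset : Int) (length : Int) (misc_data : List Int) : Prop :=
  keys ≠ [] ∨ length ≤ 0
instance (keys : List String) (offset : Int) (length : Int) (misc_data : List Int) : Decidable (Pre_misc_uninterleave_data keys offset length misc_data) := by unfold Pre_misc_uninterleave_data; infer_instance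

def pvWitness_misc_uninterleave_data : List String × Int × Int × List Int := (["a", "b"], 0, 12, [1, 2])

def Spec_misc_uninterleave_data (keys : List String) (offset : Int) (length : Int) (misc_data : List Int) (out : List (String × List Int)) : Prop := out = misc_uninterleave_data_alt keys offset length misc_data
instance (keys : List String) (offset : Int) (length : Int) (misc_data : List Int) (out : List (String × List Int)) : Decidable (Spec_misc_uninterleave_data keys offset length misc_data out) := by unfold Spec_misc_uninterleave_data; infer_instance

-- ===== CLAIM (what is proved, stated in full; the proofs are below) =====
def Claim_equal_misc_uninterleave_data : Prop := ∀ (keys : List String) (offset : Int) (length : Int) (misc_data : List Int), Dom_misc_uninterleave_data keys offset length misc_data → Pre_misc_uninterleave_data keys offset length misc_data → Spec_misc_uninterleave_data keys offset length misc_data (misc_uninterleave_data keys offset length misc_data)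

-- ===== LEMMAS AND PROOFS =====

-- how many of the first t interleave steps land on slot i (i < K): t/K, plus 1 for the first t%K slots
def pvCnt (K i t : Nat) : Nat := t / K + (if i < t % K then 1 else 0)

-- the value in slot i after t steps: misc_data appended pvCnt times
def pvRep (md : List Int) (K i t : Nat) : List Int := (List.replicate (pvCnt K i t) md).flatten

theorem pvCnt_succ (K t i : Nat) (hK : 0 < K) (hi : i < K) :
    pvCnt K i (t+1) = pvCnt K i t + (if t % K = i then 1 else 0) := by
  unfold pvCnt
  have h1 := Nat.div_add_mod t K
  have h2 := Nat.div_add_mod (t+1) K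
  have h3 := Nat.mod_lt t hK
  have h4 := Nat.mod_lt (t+1) hK
  have hub : (t+1)/K ≤ t/K + 1 := by
    have e := Nat.add_div_right t hK
    have m := Nat.div_le_div_right (c := K) (by omega : t+1 ≤ t+K)
    omega
  have hlb : t/K ≤ (t+1)/K := Nat.div_le_div_right (Nat.le_succ t)
  have h5 : (t+1)/K = t/K ∨ (t+1)/K = t/K + 1 := by omega
  rcases h5 with h5 | h5
  · rw [h5] at h2; split_ifs <;> omega
  · rw [h5, Nat.mul_add, Nat.mul_one] at h2; split_ifs <;> omega

theorem pvMod_cast (s K : Nat) (hK : 0 < K) : PySem.Int.mod (s : Int) (K : Int) = ((s % K : Nat) : Int) := by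
  have h0 : (0 : Int) ≤ (K : Int) := by positivity
  simp [PySem.Int.mod, Int.fmod_eq_emod, h0]

theorem pvFdiv_cast (n K : Nat) (hK : 0 < K) : PySem.Int.floordiv (n : Int) (K : Int) = ((n / K : Nat) : Int) := by
  have h0 : (0 : Int) ≤ (K : Int) := by positivity
  simp [PySem.Int.floordiv, Int.fdiv_eq_ediv, h0]

theorem pvModify_map_range (K j : Nat) (f : Nat → List Int) (g : List Int → List Int) :
    ((List.range K).map f).modify j g = (List.range K).map (fun i => if i = j then g (f i) else f i) := by
  apply List.ext_getElem
  · simp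
  · intro i hi hi2
    simp only [List.getElem_modify, List.getElem_map, List.getElem_range]
    split_ifs <;> first | rfl | omega

-- the interleave loop of A, over any step list, starting at step index s
theorem pvLoopA (K : Nat) (hK : 0 < K) (md : List Int) :
    ∀ (ran : List Int) (s : Nat),
      (PySem.List.enumerate ran (s : Int)).foldl
          (fun vs p => vs.modify (PySem.Int.mod p.1 (K : Int)).toNat (· ++ md))
          ((List.range K).map (fun i => pvRep md K i s))
        = (List.range K).map (fun i => pvRep md K i (s + ran.length)) := by
  intro ran
  induction ran with
  | nil => intro s; simp [PySem.List.enumerate]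
  | cons x xs ih =>
    intro s
    rw [PySem.List.enumerate_cons, List.foldl_cons]
    have hmod : (PySem.Int.mod (s : Int) (K : Int)).toNat = s % K := by
      rw [pvMod_cast s K hK, Int.toNat_natCast]
    rw [hmod, pvModify_map_range K (s % K) (fun i => pvRep md K i s) (· ++ md)]
    have hstep : (List.range K).map (fun i => if i = s % K then pvRep md K i s ++ md else pvRep md K i s)
        = (List.range K).map (fun i => pvRep md K i (s+1)) := by
      apply List.map_congr_left
      intro i hi
      rw [List.mem_range] at hi
      simp only [pvRep]
      rw [pvCnt_succ K s i hK hi]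
      by_cases h : i = s % K
      · subst h
        rw [if_pos rfl, if_pos rfl, List.replicate_succ', List.flatten_append]
        simp
      · rw [if_neg h, if_neg (fun he => h he.symm), Nat.add_zero]
    rw [hstep]
    have hcast : (s : Int) + 1 = ((s + 1 : Nat) : Int) := by push_cast; ring
    rw [hcast, ih (s + 1)]
    have harr : s + (x :: xs).length = (s + 1) + xs.length := by simp; omega
    rw [harr]

-- initial values list of A coincides with pvRep at step 0
theorem pvInit (K : Nat) (md : List Int) :
    (PySem.List.pyRange 0 ((K : Nat) : Int) 1).map (fun _ => ([] : List Int))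
      = (List.range K).map (fun i => pvRep md K i 0) := by
  rw [PySem.List.pyRange_zero_nat]
  apply List.ext_getElem
  · simp
  · intro i hi hi2
    simp [pvRep, pvCnt]

-- B's per-key value is pvRep at the final step count
theorem pvRepeat_eq (md : List Int) (K n k : Nat) (hK : 0 < K) (hk : k < K) :
    PySem.List.pyRepeat md (PySem.Int.floordiv (n : Int) (K : Int) + (if (k : Int) < PySem.Int.mod (n : Int) (K : Int) then 1 else 0))
      = pvRep md K k n := by
  rw [pvFdiv_cast n K hK, pvMod_cast n K hK]
  unfold PySem.List.pyRepeat pvRep pvCnt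
  have hc : (((n / K : Nat) : Int) + (if (k : Int) < ((n % K : Nat) : Int) then 1 else 0)).toNat
      = n / K + (if k < n % K then 1 else 0) := by
    generalize n / K = a
    generalize n % K = b
    split_ifs <;> omega
  rw [hc]

-- ===== VERDICT (by name: the statement is the Claim_ definition above) =====
theorem misc_uninterleave_data_spec : Claim_equal_misc_uninterleave_data := by
  intro keys offset length misc_data _hdom hpre
  unfold Spec_misc_uninterleave_data
  dsimp only [misc_uninterleave_data, misc_uninterleave_data_alt]
  by_cases hnil : keys = []
  · subst hnil
    simp [PySem.List.enumerate, PySem.Dict.empty]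
  · have hK : 0 < keys.length := List.length_pos_iff.mpr hnil
    rw [if_neg (by simp [hnil])]
    have hvals : (PySem.List.enumerate (PySem.List.pyRange offset (offset + length) 4)).foldl
          (fun vs p => vs.modify (PySem.Int.mod p.1 (keys.length : Int)).toNat (· ++ misc_data))
          ((PySem.List.pyRange 0 (keys.length : Int) 1).map (fun _ => ([] : List Int)))
        = (List.range keys.length).map
            (fun i => pvRep misc_data keys.length i (PySem.List.pyRange offset (offset + length) 4).length) := by
      rw [pvInit keys.length misc_data]
      have h := pvLoopA keys.length hK misc_data (PySem.List.pyRange offset (offset + length) 4) 0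
      simpa using h
    rw [hvals]
    congr 1
    apply PySem.List.foldl_congr_mem
    intro acc p hp
    rw [PySem.List.mem_enumerate_iff] at hp
    obtain ⟨k, hk, hpk⟩ := hp
    subst hpk
    simp only [zero_add]
    congr 1
    rw [PySem.List.pyGetD_of_nonneg _ _ (by positivity), Int.toNat_natCast]
    rw [List.getD_eq_getElem _ _ (by simpa using hk), List.getElem_map, List.getElem_range]
    rw [pvRepeat_eq misc_data keys.length (PySem.List.pyRange offset (offset + length) 4).length k hK hk]
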